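-- pv_equiv track=rewrite | github.com/Tomerfi1210/Python_Projects | nonogram.py | intersection_row
-- ===== SOURCE A (Python) =====
-- Q_MARK = -1
--
-- def intersection_row(rows):
--     """
--     This functions gets list of rows and returns a list of
--     the constraint common to all rows.
--     """
--     lst = []
--     count = 0
--     num_of_cols = rows[0]
--     if not rows:
--         return lst
--     for i in range(len(num_of_cols)):
--         for j in range(len(rows)-1):
--             if rows[j][i] == rows[j+1][i]:
--                 count += 1
--         if count == len(rows) - 1:
--             # if all rows are similar in a specific index
--             lst.append(rows[0][i])
--         else:
--             # not all rows are similar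
--             lst.append(Q_MARK)
--         count = 0
--     return lst
-- ===== SOURCE B (Python) =====
-- Q_MARK = -1
--
-- def intersection_row(rows):
--     """
--     This functions gets list of rows and returns a list of
--     the constraint common to all rows.
--     """
--     num_of_cols = rows[0]
--     lst = []
--     for i in range(len(num_of_cols)):
--         col = {row[i] for row in rows}
--         lst.append(num_of_cols[i] if len(col) == 1 else Q_MARK)
--     return lst
-- ===== Notes on version B (the rewrite author's own statement) =====
-- stated objective: simpler
-- what changed: Per column, B collects the column's values into a set and tests len == 1, replacing A's inner loop that counts equal consecutive-row pairs and its count == len(rows)-1 test with a reset counter.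
import Mathlib
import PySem

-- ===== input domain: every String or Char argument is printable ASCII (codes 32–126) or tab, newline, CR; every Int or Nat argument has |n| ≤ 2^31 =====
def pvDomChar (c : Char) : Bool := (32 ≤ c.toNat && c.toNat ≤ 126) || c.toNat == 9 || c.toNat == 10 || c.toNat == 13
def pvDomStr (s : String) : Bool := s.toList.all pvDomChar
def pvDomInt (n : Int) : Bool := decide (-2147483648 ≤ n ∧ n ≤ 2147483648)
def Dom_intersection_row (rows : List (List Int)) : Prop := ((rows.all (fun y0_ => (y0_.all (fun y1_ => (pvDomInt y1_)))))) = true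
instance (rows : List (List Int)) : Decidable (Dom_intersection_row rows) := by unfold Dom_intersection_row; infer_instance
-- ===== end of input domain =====

-- B replaces A's per-column consecutive-pair equality counter (and its count == len(rows)-1
-- test with a reset counter) by collecting each column's distinct values into a set and
-- testing len == 1 (objective: simpler; same asymptotic cost).

-- ===== PORT A =====
-- rows[j][i] is ported as pyGetD; the defaults are unreachable inside Pre_, where every index is in range.
def intersection_row (rows : List (List Int)) : List Int :=
  match PySem.List.pyGet? rows 0 with
  | none => []   -- rows[0] raises IndexError (rows = []); excluded by Pre_
  | some num_of_cols =>
    if rows.isEmpty then [] else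
    ((PySem.List.pyRange 0 (num_of_cols.length : Int) 1).foldl
      (fun (st : List Int × Int) i =>
        let count := (PySem.List.pyRange 0 ((rows.length : Int) - 1) 1).foldl
          (fun c j =>
            if PySem.List.pyGetD (PySem.List.pyGetD rows j []) i 0 =
               PySem.List.pyGetD (PySem.List.pyGetD rows (j+1) []) i 0
            then c + 1 else c) st.2
        if count = (rows.length : Int) - 1
        then (st.1 ++ [PySem.List.pyGetD (PySem.List.pyGetD rows 0 []) i 0], (0 : Int))
        else (st.1 ++ [(-1 : Int)], (0 : Int)))
      ([], 0)).1

-- ===== PORT B =====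
def intersection_row_alt (rows : List (List Int)) : List Int :=
  match PySem.List.pyGet? rows 0 with
  | none => []   -- rows[0] raises IndexError (rows = []); excluded by Pre_
  | some num_of_cols =>
    (PySem.List.pyRange 0 (num_of_cols.length : Int) 1).map (fun i =>
      let col : PySem.Set Int := PySem.Set.ofList (rows.map (fun r => PySem.List.pyGetD r i 0))
      if col.length = 1 then PySem.List.pyGetD num_of_cols i 0 else -1)

-- ===== PRECONDITION & SPEC =====
-- Pre_ excludes exactly the inputs on which the Python A raises IndexError: empty input
-- (rows[0]) and ragged input where some row is shorter than rows[0] (rows[j][i] out of range).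
def Pre_intersection_row (rows : List (List Int)) : Prop :=
  rows ≠ [] ∧ ∀ r ∈ rows, (rows.getD 0 []).length ≤ r.length
instance (rows : List (List Int)) : Decidable (Pre_intersection_row rows) := by
  unfold Pre_intersection_row; infer_instance

def pvWitness_intersection_row : List (List Int) := [[1, 2, 3], [1, 5, 3], [1, 2, 3]]

def Spec_intersection_row (rows : List (List Int)) (out : List Int) : Prop := out = intersection_row_alt rows
instance (rows : List (List Int)) (out : List Int) : Decidable (Spec_intersection_row rows out) := by unfold Spec_intersection_row; infer_instance

-- ===== CLAIM (what is proved, stated in full; the proofs are below) =====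
def Claim_equal_intersection_row : Prop := ∀ (rows : List (List Int)), Dom_intersection_row rows → Pre_intersection_row rows → Spec_intersection_row rows (intersection_row rows)

-- ===== LEMMAS AND PROOFS =====

-- pvStepA / pvColA name A's outer-loop step and its per-column value (defeq to the port's lambdas).
def pvStepA (rows : List (List Int)) (st : List Int × Int) (i : Int) : List Int × Int :=
  let count := (PySem.List.pyRange 0 ((rows.length : Int) - 1) 1).foldl
    (fun c j =>
      if PySem.List.pyGetD (PySem.List.pyGetD rows j []) i 0 =
         PySem.List.pyGetD (PySem.List.pyGetD rows (j+1) []) i 0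
      then c + 1 else c) st.2
  if count = (rows.length : Int) - 1
  then (st.1 ++ [PySem.List.pyGetD (PySem.List.pyGetD rows 0 []) i 0], (0 : Int))
  else (st.1 ++ [(-1 : Int)], (0 : Int))

def pvColA (rows : List (List Int)) (i : Int) : Int :=
  if (PySem.List.pyRange 0 ((rows.length : Int) - 1) 1).foldl
      (fun c j =>
        if PySem.List.pyGetD (PySem.List.pyGetD rows j []) i 0 =
           PySem.List.pyGetD (PySem.List.pyGetD rows (j+1) []) i 0
        then c + 1 else c) 0 = (rows.length : Int) - 1
  then PySem.List.pyGetD (PySem.List.pyGetD rows 0 []) i 0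
  else -1

theorem pvFoldA (rows : List (List Int)) (l : List Int) :
    ∀ init : List Int,
    (l.foldl (pvStepA rows) (init, 0)).1 = init ++ l.map (pvColA rows) := by
  induction l with
  | nil => intro init; simp
  | cons i t ih =>
    intro init
    rw [List.foldl_cons]
    have h : pvStepA rows (init, 0) i = (init ++ [pvColA rows i], 0) := by
      unfold pvStepA pvColA
      dsimp only
      split_ifs <;> rfl
    rw [h, ih]
    simp

theorem pvSet_len_one {vs : List Int} {v0 : Int} :
    (PySem.Set.ofList (v0 :: vs)).length = 1 ↔ ∀ x ∈ vs, x = v0 := by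
  constructor
  · intro h x hx
    obtain ⟨a, ha⟩ := List.length_eq_one_iff.mp h
    have hv0 : v0 ∈ PySem.Set.ofList (v0 :: vs) := by
      rw [PySem.Set.mem_ofList]; exact List.mem_cons_self ..
    have hxm : x ∈ PySem.Set.ofList (v0 :: vs) := by
      rw [PySem.Set.mem_ofList]; exact List.mem_cons_of_mem _ hx
    rw [ha] at hv0 hxm
    simp at hv0 hxm; omega
  · intro h
    have aux : ∀ (ws : List Int), (∀ x ∈ ws, x = v0) →
        List.foldl PySem.Set.add [v0] ws = [v0] := by
      intro ws
      induction ws with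
      | nil => intro _; rfl
      | cons w t ih =>
        intro hw
        have : w = v0 := hw w (List.mem_cons_self ..)
        subst this
        rw [List.foldl_cons]
        have : PySem.Set.add [w] w = [w] := by simp [PySem.Set.add, PySem.Set.contains]
        rw [this]
        exact ih (fun x hx => hw x (List.mem_cons_of_mem _ hx))
    rw [PySem.Set.ofList_eq_foldl, List.foldl_cons]
    have h0 : PySem.Set.add [] v0 = [v0] := rfl
    rw [h0, aux vs h]
    rfl

-- chain: all adjacent pairs equal iff all equal to head
theorem pvChain : ∀ (v0 : Int) (vs : List Int),
    (∀ j : Nat, (h : j + 1 < (v0::vs).length) →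
        (v0::vs)[j]'(by omega) = (v0::vs)[j+1]'h) ↔ ∀ x ∈ vs, x = v0 := by
  intro v0 vs
  induction vs generalizing v0 with
  | nil => simp
  | cons b t ih =>
    constructor
    · intro h x hx
      have hb : v0 = b := h 0 (by simp)
      have ht : ∀ x ∈ t, x = b := by
        rw [← ih b]
        intro j hj
        exact h (j+1) (by simpa using hj)
      rcases List.mem_cons.mp hx with rfl | hxt
      · omega
      · have := ht x hxt; omega
    · intro h j hj
      have hb : b = v0 := h b (List.mem_cons_self ..)
      have ht : ∀ x ∈ t, x = b := fun x hx => by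
        have := h x (List.mem_cons_of_mem _ hx); omega
      match j with
      | 0 => simpa using hb.symm
      | (k+1) => exact (ih b).mpr ht k (by simpa using hj)

theorem pvCol_eq (r0 : List Int) (rest : List (List Int)) (i : Int) :
    pvColA (r0::rest) i =
      if (PySem.Set.ofList ((r0::rest).map (fun r => PySem.List.pyGetD r i 0))).length = 1
      then PySem.List.pyGetD r0 i 0 else -1 := by
  unfold pvColA
  have hL : ((r0::rest).length : Int) - 1 = (rest.length : Int) := by simp
  have hcount :
      (PySem.List.pyRange 0 (((r0::rest).length : Int) - 1) 1).foldl
        (fun c j =>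
          if PySem.List.pyGetD (PySem.List.pyGetD (r0::rest) j []) i 0 =
             PySem.List.pyGetD (PySem.List.pyGetD (r0::rest) (j+1) []) i 0
          then c + 1 else c) 0
      = ((PySem.List.pyRange 0 ((rest.length : Int)) 1).countP
          (fun j => decide (PySem.List.pyGetD (PySem.List.pyGetD (r0::rest) j []) i 0 =
             PySem.List.pyGetD (PySem.List.pyGetD (r0::rest) (j+1) []) i 0)) : Int) := by
    rw [hL]
    have := PySem.List.foldl_count_if
      (fun j => decide (PySem.List.pyGetD (PySem.List.pyGetD (r0::rest) j []) i 0 =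
             PySem.List.pyGetD (PySem.List.pyGetD (r0::rest) (j+1) []) i 0))
      (PySem.List.pyRange 0 ((rest.length : Int)) 1) 0
    simpa using this
  have hlen : (PySem.List.pyRange 0 ((rest.length : Int)) 1).length = rest.length := by
    simp [PySem.List.length_pyRange_one]
  have hle := List.countP_le_length
    (p := (fun j => decide (PySem.List.pyGetD (PySem.List.pyGetD (r0::rest) j []) i 0 =
             PySem.List.pyGetD (PySem.List.pyGetD (r0::rest) (j+1) []) i 0)))
    (l := PySem.List.pyRange 0 ((rest.length : Int)) 1)
  rw [hlen] at hle
  have hcond :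
      ((PySem.List.pyRange 0 (((r0::rest).length : Int) - 1) 1).foldl
        (fun c j =>
          if PySem.List.pyGetD (PySem.List.pyGetD (r0::rest) j []) i 0 =
             PySem.List.pyGetD (PySem.List.pyGetD (r0::rest) (j+1) []) i 0
          then c + 1 else c) 0 = ((r0::rest).length : Int) - 1)
      ↔ (PySem.Set.ofList ((r0::rest).map (fun r => PySem.List.pyGetD r i 0))).length = 1 := by
    rw [hcount, hL]
    have hiff1 : ((PySem.List.pyRange 0 ((rest.length : Int)) 1).countP
            (fun j => decide (PySem.List.pyGetD (PySem.List.pyGetD (r0::rest) j []) i 0 =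
               PySem.List.pyGetD (PySem.List.pyGetD (r0::rest) (j+1) []) i 0)) : Int)
          = (rest.length : Int)
        ↔ (PySem.List.pyRange 0 ((rest.length : Int)) 1).countP
            (fun j => decide (PySem.List.pyGetD (PySem.List.pyGetD (r0::rest) j []) i 0 =
               PySem.List.pyGetD (PySem.List.pyGetD (r0::rest) (j+1) []) i 0))
          = (PySem.List.pyRange 0 ((rest.length : Int)) 1).length := by
      rw [hlen]; omega
    rw [hiff1, List.countP_eq_length]
    have hiff2 : (∀ j ∈ PySem.List.pyRange 0 ((rest.length : Int)) 1,
          (decide (PySem.List.pyGetD (PySem.List.pyGetD (r0::rest) j []) i 0 =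
               PySem.List.pyGetD (PySem.List.pyGetD (r0::rest) (j+1) []) i 0)) = true)
        ↔ ∀ x ∈ rest.map (fun r => PySem.List.pyGetD r i 0), x = PySem.List.pyGetD r0 i 0 := by
      rw [← pvChain]
      have hbridge : ∀ (k : Nat) (hk : k < (r0::rest).length),
          (PySem.List.pyGetD r0 i 0 :: rest.map (fun r => PySem.List.pyGetD r i 0))[k]'(by simpa using hk)
          = PySem.List.pyGetD ((r0::rest)[k]'hk) i 0 := by
        intro k hk
        match k with
        | 0 => rfl
        | (k+1) => simp
      constructor
      · intro h k hk
        have hk1 : k < rest.length := by simpa using hk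
        have := h (k : Int) (by rw [PySem.List.mem_pyRange_one]; omega)
        rw [decide_eq_true_eq] at this
        have e1 : ((k : Int) + 1) = ((k+1 : Nat) : Int) := by push_cast; ring
        rw [e1, PySem.List.pyGetD_natCast, PySem.List.pyGetD_natCast] at this
        rw [List.getD_eq_getElem _ _ (by simpa using Nat.lt_succ_of_lt hk1),
            List.getD_eq_getElem _ _ (by simpa using hk1)] at this
        rw [hbridge k (by omega), hbridge (k+1) (by simpa using hk)]
        exact this
      · intro h j hj
        rw [PySem.List.mem_pyRange_one] at hj
        obtain ⟨k, rfl⟩ : ∃ k : Nat, j = (k : Int) := ⟨j.toNat, by omega⟩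
        have hk1 : k < rest.length := by omega
        have := h k (by simpa using Nat.succ_lt_succ hk1)
        rw [hbridge k (by simp; omega), hbridge (k+1) (by simpa using hk1)] at this
        rw [decide_eq_true_eq]
        have e1 : ((k : Int) + 1) = ((k+1 : Nat) : Int) := by push_cast; ring
        rw [e1, PySem.List.pyGetD_natCast, PySem.List.pyGetD_natCast]
        rw [List.getD_eq_getElem _ _ (by simpa using Nat.lt_succ_of_lt hk1),
            List.getD_eq_getElem _ _ (by simpa using hk1)]
        exact this
    rw [hiff2, ← pvSet_len_one (vs := rest.map (fun r => PySem.List.pyGetD r i 0))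
          (v0 := PySem.List.pyGetD r0 i 0)]
    simp
  have h0 : PySem.List.pyGetD (PySem.List.pyGetD (r0::rest) 0 []) i 0 = PySem.List.pyGetD r0 i 0 := by
    norm_num [pysem]
  simp only [hcond, h0]


-- ===== VERDICT (by name: the statement is the Claim_ definition above) =====
theorem intersection_row_spec : Claim_equal_intersection_row := by
  unfold Claim_equal_intersection_row Spec_intersection_row
  intro rows _ hpre
  cases rows with
  | nil => exact absurd rfl hpre.1
  | cons r0 rest =>
    have hget : PySem.List.pyGet? (r0::rest) 0 = some r0 := by simp [pysem]
    unfold intersection_row intersection_row_alt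
    rw [hget]
    simp only [List.isEmpty_cons, Bool.false_eq_true, if_false]
    have hA := pvFoldA (r0::rest) (PySem.List.pyRange 0 (r0.length : Int) 1) []
    refine hA.trans ?_
    rw [List.nil_append]
    exact List.map_congr_left fun i _ => pvCol_eq r0 rest i
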